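-- pv_equiv track=rewrite | github.com/gsampaio-rh/aiops_apps | stream.py | highlight_prompt
-- ===== SOURCE A (Python) =====
-- def highlight_prompt(prompt):
--     special_tokens = [
--         "<|begin_of_text|>",
--         "<|start_header_id|>",
--         "<|end_header_id|>",
--         "<|eot_id|>",
--     ]
--     for token in special_tokens:
--         prompt = prompt.replace(
--             token, f"<span style='color:blue; font-weight:bold;'>{token}</span>"
--         )
--     return prompt
-- ===== SOURCE B (Python) =====
-- SPAN_OPEN = "<span style='color:blue; font-weight:bold;'>"
-- SPAN_CLOSE = "</span>"
-- TOKENS = ("<|begin_of_text|>", "<|start_header_id|>", "<|end_header_id|>", "<|eot_id|>")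
--
--
-- def highlight_prompt(prompt):
--     pieces = []
--     i = 0
--     n = len(prompt)
--     while i < n:
--         for token in TOKENS:
--             if prompt.startswith(token, i):
--                 pieces.append(SPAN_OPEN + token + SPAN_CLOSE)
--                 i += len(token)
--                 break
--         else:
--             pieces.append(prompt[i])
--             i += 1
--     return "".join(pieces)
-- ===== Notes on version B (the rewrite author's own statement) =====
-- stated objective: alternative
-- what changed: Replaces four sequential whole-string str.replace passes by a single left-to-right scan that at each position tries the four tokens and emits either a wrapped token or the current character, joining the pieces once.
import Mathlib
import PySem

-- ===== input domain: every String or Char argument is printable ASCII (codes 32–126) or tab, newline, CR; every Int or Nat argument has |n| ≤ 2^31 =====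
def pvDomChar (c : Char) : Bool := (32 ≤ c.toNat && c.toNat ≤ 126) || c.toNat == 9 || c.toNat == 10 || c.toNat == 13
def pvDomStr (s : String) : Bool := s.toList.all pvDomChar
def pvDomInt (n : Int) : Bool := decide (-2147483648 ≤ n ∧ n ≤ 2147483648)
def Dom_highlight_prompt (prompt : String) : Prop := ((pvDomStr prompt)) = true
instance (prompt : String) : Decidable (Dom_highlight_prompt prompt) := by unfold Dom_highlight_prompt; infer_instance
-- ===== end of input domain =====

set_option maxRecDepth 8192

-- B replaces A's four sequential whole-string str.replace passes by one left-to-right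
-- scan that tries the four tokens at each position (objective: alternative; not timed faster).

-- ===== PORT A =====
-- A: for token in special_tokens: prompt = prompt.replace(token, f"<span ...>{token}</span>")
def highlight_prompt (prompt : String) : String :=
  let special_tokens : List String :=
    ["<|begin_of_text|>", "<|start_header_id|>", "<|end_header_id|>", "<|eot_id|>"]
  special_tokens.foldl
    (fun p token =>
      PySem.Str.replace p token
        ("<span style='color:blue; font-weight:bold;'>" ++ token ++ "</span>"))
    prompt

-- ===== PORT B =====
-- B's special_tokens, as char lists (the scan works on code points)
def pvTok1 : List Char := "<|begin_of_text|>".toList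
def pvTok2 : List Char := "<|start_header_id|>".toList
def pvTok3 : List Char := "<|end_header_id|>".toList
def pvTok4 : List Char := "<|eot_id|>".toList

-- B's f-string: the span markup around a matched token
def pvWrap (tk : List Char) : List Char :=
  "<span style='color:blue; font-weight:bold;'>".toList ++ tk ++ "</span>".toList

-- B's while loop: at each position try the tokens in order (the for/else);
-- on a match emit the wrapped token and skip it, else emit the character.
def pvScan : List Char → List Char
  | [] => []
  | c :: t =>
    if pvTok1.isPrefixOf (c :: t) then pvWrap pvTok1 ++ pvScan (List.drop pvTok1.length (c :: t))
    else if pvTok2.isPrefixOf (c :: t) then pvWrap pvTok2 ++ pvScan (List.drop pvTok2.length (c :: t))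
    else if pvTok3.isPrefixOf (c :: t) then pvWrap pvTok3 ++ pvScan (List.drop pvTok3.length (c :: t))
    else if pvTok4.isPrefixOf (c :: t) then pvWrap pvTok4 ++ pvScan (List.drop pvTok4.length (c :: t))
    else c :: pvScan t
termination_by l => l.length
decreasing_by
  all_goals simp [pvTok1, pvTok2, pvTok3, pvTok4]

def highlight_prompt_alt (prompt : String) : String :=
  String.ofList (pvScan prompt.toList)

-- ===== PRECONDITION & SPEC =====
def Spec_highlight_prompt (prompt : String) (out : String) : Prop := out = highlight_prompt_alt prompt
instance (prompt : String) (out : String) : Decidable (Spec_highlight_prompt prompt out) := by unfold Spec_highlight_prompt; infer_instance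

-- ===== CLAIM (what is proved, stated in full; the proofs are below) =====
def Claim_equal_highlight_prompt : Prop := ∀ (prompt : String), Dom_highlight_prompt prompt → Spec_highlight_prompt prompt (highlight_prompt prompt)

-- ===== LEMMAS AND PROOFS =====

-- A clean recursion equal to PySem.Chars.replace for a non-empty needle (o :: os)
def pvRep (o : Char) (os new : List Char) : List Char → List Char
  | [] => []
  | c :: t =>
    if (o :: os).isPrefixOf (c :: t) then new ++ pvRep o os new (t.drop os.length)
    else c :: pvRep o os new t
termination_by l => l.length
decreasing_by
  all_goals simp

lemma pvRep_nil (o : Char) (os new : List Char) : pvRep o os new [] = [] := by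
  rw [pvRep.eq_def]

lemma pvRep_cons (o : Char) (os new : List Char) (c : Char) (t : List Char) :
    pvRep o os new (c :: t) =
      if (o :: os).isPrefixOf (c :: t) then new ++ pvRep o os new (t.drop os.length)
      else c :: pvRep o os new t := by
  conv_lhs => rw [pvRep.eq_def]

lemma go_eq_pvRep (o : Char) (os new : List Char) :
    ∀ fuel l acc, l.length ≤ fuel →
      PySem.Chars.replace.go (o :: os) new fuel l acc = acc.reverse ++ pvRep o os new l := by
  intro fuel
  induction fuel with
  | zero =>
      intro l acc h
      have : l = [] := List.eq_nil_of_length_eq_zero (by omega)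
      subst this
      rw [PySem.Chars.replace.go, pvRep_nil]
  | succ fuel ih =>
      intro l acc h
      match l with
      | [] => rw [PySem.Chars.replace.go, pvRep_nil] <;> simp
      | c :: t =>
          rw [PySem.Chars.replace.go, pvRep_cons]
          by_cases hp : (o :: os).isPrefixOf (c :: t)
          · simp only [hp, if_true]
            rw [ih _ _ (by simp at h ⊢; omega)]
            simp
          · simp only [hp, if_false, Bool.false_eq_true]
            rw [ih _ _ (by simp at h ⊢; omega)]
            simp

lemma replace_eq_pvRep (o : Char) (os new : List Char) (s : List Char) :
    PySem.Chars.replace s (o :: os) new = pvRep o os new s := by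
  rw [PySem.Chars.replace]
  simp [go_eq_pvRep o os new s.length s [] le_rfl]

-- a prefix agrees with the list at every index below its length
lemma prefix_getElem? {p l : List Char} (h : p <+: l) (m : Nat) (hm : m < p.length) :
    l[m]? = p[m]? := by
  obtain ⟨r, rfl⟩ := h
  exact List.getElem?_append_left hm

-- an index mismatch inside u refutes "t is a prefix of u ++ x" whatever x is
lemma notPrefix_of_mismatch (t u x : List Char) (m : Nat) (hm : m < u.length)
    (hmt : m < t.length) (h : t[m]? ≠ u[m]?) : ¬ t.isPrefixOf (u ++ x) = true := by
  intro hp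
  rw [List.isPrefixOf_iff_prefix] at hp
  have h1 : (u ++ x)[m]? = t[m]? := prefix_getElem? hp m hmt
  have h2 : (u ++ x)[m]? = u[m]? := List.getElem?_append_left hm
  exact h (h1 ▸ h2)

-- if the needle matches nowhere inside w, replacement passes over w
lemma pvRep_pass_core (o : Char) (os new : List Char) :
    ∀ w x, (∀ k, k < w.length → ¬ (o :: os).isPrefixOf (w.drop k ++ x) = true) →
      pvRep o os new (w ++ x) = w ++ pvRep o os new x := by
  intro w
  induction w with
  | nil => intro x _; simp
  | cons a w' ih =>
      intro x h
      rw [List.cons_append, pvRep_cons, if_neg (by simpa using h 0 (by simp))]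
      rw [ih x (fun k hk => by simpa using h (k + 1) (by simpa using hk))]
      simp

-- pass-over, by char conditions: '<' occurs in w only at index 0, and the needle
-- (which starts with o = '<') disagrees with w at some index inside both
lemma pvRep_pass (o : Char) (os new w x : List Char)
    (h2 : ∀ a ∈ w.drop 1, a ≠ o)
    (h3 : ∃ m, m < w.length ∧ m < os.length + 1 ∧ (o :: os)[m]? ≠ w[m]?) :
    pvRep o os new (w ++ x) = w ++ pvRep o os new x := by
  apply pvRep_pass_core
  intro k hk
  match k with
  | 0 =>
      obtain ⟨m, hmw, hmt, hne⟩ := h3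
      simpa using notPrefix_of_mismatch (o :: os) w x m hmw (by simpa using hmt) hne
  | k + 1 =>
      apply notPrefix_of_mismatch (o :: os) (w.drop (k + 1)) x 0
        (by simp; omega) (by simp)
      have e1 : (w.drop (k + 1))[0]? = some w[k + 1] := by
        rw [List.getElem?_drop]
        exact List.getElem?_eq_getElem (by omega)
      rw [e1]
      have : w[k + 1] ∈ w.drop 1 := by
        have : (w.drop 1)[k]? = some w[k + 1] := by
          rw [List.getElem?_drop, Nat.add_comm]
          exact List.getElem?_eq_getElem hk
        exact List.mem_of_getElem? this
      simpa using (h2 _ this).symm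

lemma pvRep_match (o : Char) (os new x : List Char) :
    pvRep o os new ((o :: os) ++ x) = new ++ pvRep o os new x := by
  rw [List.cons_append, pvRep_cons, if_pos, List.drop_left]
  rw [List.isPrefixOf_iff_prefix]
  exact List.prefix_append _ _

-- a '<'-free prefix of a replacement output was already a prefix of the input
-- (the replacement text starts with '<', and copying preserves characters)
lemma pvQ (o : Char) (os new : List Char) (hnew : new[0]? = some '<') :
    ∀ l w, (∀ a ∈ w, a ≠ '<') → w <+: pvRep o os new l → w <+: l := by
  intro l
  induction l using pvRep.induct o os with
  | case1 =>
      intro w hw h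
      rw [pvRep_nil] at h
      simpa using h
  | case2 c t hp ih =>
      intro w hw h
      rw [pvRep_cons, if_pos hp] at h
      match w, h with
      | [], _ => exact List.nil_prefix
      | a :: w', h =>
          exfalso
          have h0 : (new ++ pvRep o os new (t.drop os.length))[0]? = some a :=
            prefix_getElem? h 0 (by simp)
          have hlen : 0 < new.length := by
            cases new with
            | nil => simp at hnew
            | cons b bs => simp
          rw [List.getElem?_append_left hlen, hnew] at h0
          exact hw a (by simp) (by injection h0 with h0; exact h0.symm)
  | case3 c t hp ih =>
      intro w hw h
      rw [pvRep_cons, if_neg hp] at h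
      match w, h with
      | [], _ => exact List.nil_prefix
      | a :: w', h =>
          rw [List.cons_prefix_cons] at h ⊢
          exact ⟨h.1, ih w' (fun a ha => hw a (by simp [ha])) h.2⟩

-- pvScan unfolding
lemma pvScan_nil : pvScan [] = [] := by rw [pvScan.eq_def]

lemma pvScan_cons (c : Char) (t : List Char) :
    pvScan (c :: t) =
      if pvTok1.isPrefixOf (c :: t) then pvWrap pvTok1 ++ pvScan (List.drop pvTok1.length (c :: t))
      else if pvTok2.isPrefixOf (c :: t) then pvWrap pvTok2 ++ pvScan (List.drop pvTok2.length (c :: t))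
      else if pvTok3.isPrefixOf (c :: t) then pvWrap pvTok3 ++ pvScan (List.drop pvTok3.length (c :: t))
      else if pvTok4.isPrefixOf (c :: t) then pvWrap pvTok4 ++ pvScan (List.drop pvTok4.length (c :: t))
      else c :: pvScan t := by
  conv_lhs => rw [pvScan.eq_def]


-- token tails (each token is '<' followed by its tail)
def pvS1 : List Char := "|begin_of_text|>".toList
def pvS2 : List Char := "|start_header_id|>".toList
def pvS3 : List Char := "|end_header_id|>".toList
def pvS4 : List Char := "|eot_id|>".toList

def pvPre : List Char := "<span style='color:blue; font-weight:bold;'>".toList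
def pvSuf : List Char := "</span>".toList

lemma tok1_eq : pvTok1 = '<' :: pvS1 := by simp [pvTok1, pvS1]
lemma tok2_eq : pvTok2 = '<' :: pvS2 := by simp [pvTok2, pvS2]
lemma tok3_eq : pvTok3 = '<' :: pvS3 := by simp [pvTok3, pvS3]
lemma tok4_eq : pvTok4 = '<' :: pvS4 := by simp [pvTok4, pvS4]

lemma wrap_eq (tk : List Char) : pvWrap tk = pvPre ++ tk ++ pvSuf := rfl

-- the four replacement stages of A
def pvStep1 (l : List Char) : List Char := pvRep '<' pvS1 (pvWrap pvTok1) l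
def pvStep2 (l : List Char) : List Char := pvRep '<' pvS2 (pvWrap pvTok2) l
def pvStep3 (l : List Char) : List Char := pvRep '<' pvS3 (pvWrap pvTok3) l
def pvStep4 (l : List Char) : List Char := pvRep '<' pvS4 (pvWrap pvTok4) l
def pvComp (l : List Char) : List Char := pvStep4 (pvStep3 (pvStep2 (pvStep1 l)))

-- needle i passes over token j ≠ i (mismatch inside the token; '<' occurs only at its head)
lemma pass12 (new x : List Char) : pvRep '<' pvS1 new (pvTok2 ++ x) = pvTok2 ++ pvRep '<' pvS1 new x :=
  pvRep_pass '<' pvS1 new pvTok2 x (by simp [pvTok1, pvTok2, pvTok3, pvTok4, pvS1, pvS2, pvS3, pvS4, pvPre, pvSuf, pvWrap]) ⟨2, by simp [pvTok1, pvTok2, pvTok3, pvTok4, pvS1, pvS2, pvS3, pvS4, pvPre, pvSuf, pvWrap], by simp [pvTok1, pvTok2, pvTok3, pvTok4, pvS1, pvS2, pvS3, pvS4, pvPre, pvSuf, pvWrap], by simp [pvTok1, pvTok2, pvTok3, pvTok4, pvS1, pvS2, pvS3, pvS4, pvPre, pvSuf, pvWrap]⟩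
lemma pass13 (new x : List Char) : pvRep '<' pvS1 new (pvTok3 ++ x) = pvTok3 ++ pvRep '<' pvS1 new x :=
  pvRep_pass '<' pvS1 new pvTok3 x (by simp [pvTok1, pvTok2, pvTok3, pvTok4, pvS1, pvS2, pvS3, pvS4, pvPre, pvSuf, pvWrap]) ⟨2, by simp [pvTok1, pvTok2, pvTok3, pvTok4, pvS1, pvS2, pvS3, pvS4, pvPre, pvSuf, pvWrap], by simp [pvTok1, pvTok2, pvTok3, pvTok4, pvS1, pvS2, pvS3, pvS4, pvPre, pvSuf, pvWrap], by simp [pvTok1, pvTok2, pvTok3, pvTok4, pvS1, pvS2, pvS3, pvS4, pvPre, pvSuf, pvWrap]⟩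
lemma pass14 (new x : List Char) : pvRep '<' pvS1 new (pvTok4 ++ x) = pvTok4 ++ pvRep '<' pvS1 new x :=
  pvRep_pass '<' pvS1 new pvTok4 x (by simp [pvTok1, pvTok2, pvTok3, pvTok4, pvS1, pvS2, pvS3, pvS4, pvPre, pvSuf, pvWrap]) ⟨2, by simp [pvTok1, pvTok2, pvTok3, pvTok4, pvS1, pvS2, pvS3, pvS4, pvPre, pvSuf, pvWrap], by simp [pvTok1, pvTok2, pvTok3, pvTok4, pvS1, pvS2, pvS3, pvS4, pvPre, pvSuf, pvWrap], by simp [pvTok1, pvTok2, pvTok3, pvTok4, pvS1, pvS2, pvS3, pvS4, pvPre, pvSuf, pvWrap]⟩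
lemma pass21 (new x : List Char) : pvRep '<' pvS2 new (pvTok1 ++ x) = pvTok1 ++ pvRep '<' pvS2 new x :=
  pvRep_pass '<' pvS2 new pvTok1 x (by simp [pvTok1, pvTok2, pvTok3, pvTok4, pvS1, pvS2, pvS3, pvS4, pvPre, pvSuf, pvWrap]) ⟨2, by simp [pvTok1, pvTok2, pvTok3, pvTok4, pvS1, pvS2, pvS3, pvS4, pvPre, pvSuf, pvWrap], by simp [pvTok1, pvTok2, pvTok3, pvTok4, pvS1, pvS2, pvS3, pvS4, pvPre, pvSuf, pvWrap], by simp [pvTok1, pvTok2, pvTok3, pvTok4, pvS1, pvS2, pvS3, pvS4, pvPre, pvSuf, pvWrap]⟩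
lemma pass23 (new x : List Char) : pvRep '<' pvS2 new (pvTok3 ++ x) = pvTok3 ++ pvRep '<' pvS2 new x :=
  pvRep_pass '<' pvS2 new pvTok3 x (by simp [pvTok1, pvTok2, pvTok3, pvTok4, pvS1, pvS2, pvS3, pvS4, pvPre, pvSuf, pvWrap]) ⟨2, by simp [pvTok1, pvTok2, pvTok3, pvTok4, pvS1, pvS2, pvS3, pvS4, pvPre, pvSuf, pvWrap], by simp [pvTok1, pvTok2, pvTok3, pvTok4, pvS1, pvS2, pvS3, pvS4, pvPre, pvSuf, pvWrap], by simp [pvTok1, pvTok2, pvTok3, pvTok4, pvS1, pvS2, pvS3, pvS4, pvPre, pvSuf, pvWrap]⟩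
lemma pass24 (new x : List Char) : pvRep '<' pvS2 new (pvTok4 ++ x) = pvTok4 ++ pvRep '<' pvS2 new x :=
  pvRep_pass '<' pvS2 new pvTok4 x (by simp [pvTok1, pvTok2, pvTok3, pvTok4, pvS1, pvS2, pvS3, pvS4, pvPre, pvSuf, pvWrap]) ⟨2, by simp [pvTok1, pvTok2, pvTok3, pvTok4, pvS1, pvS2, pvS3, pvS4, pvPre, pvSuf, pvWrap], by simp [pvTok1, pvTok2, pvTok3, pvTok4, pvS1, pvS2, pvS3, pvS4, pvPre, pvSuf, pvWrap], by simp [pvTok1, pvTok2, pvTok3, pvTok4, pvS1, pvS2, pvS3, pvS4, pvPre, pvSuf, pvWrap]⟩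
lemma pass31 (new x : List Char) : pvRep '<' pvS3 new (pvTok1 ++ x) = pvTok1 ++ pvRep '<' pvS3 new x :=
  pvRep_pass '<' pvS3 new pvTok1 x (by simp [pvTok1, pvTok2, pvTok3, pvTok4, pvS1, pvS2, pvS3, pvS4, pvPre, pvSuf, pvWrap]) ⟨2, by simp [pvTok1, pvTok2, pvTok3, pvTok4, pvS1, pvS2, pvS3, pvS4, pvPre, pvSuf, pvWrap], by simp [pvTok1, pvTok2, pvTok3, pvTok4, pvS1, pvS2, pvS3, pvS4, pvPre, pvSuf, pvWrap], by simp [pvTok1, pvTok2, pvTok3, pvTok4, pvS1, pvS2, pvS3, pvS4, pvPre, pvSuf, pvWrap]⟩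
lemma pass32 (new x : List Char) : pvRep '<' pvS3 new (pvTok2 ++ x) = pvTok2 ++ pvRep '<' pvS3 new x :=
  pvRep_pass '<' pvS3 new pvTok2 x (by simp [pvTok1, pvTok2, pvTok3, pvTok4, pvS1, pvS2, pvS3, pvS4, pvPre, pvSuf, pvWrap]) ⟨2, by simp [pvTok1, pvTok2, pvTok3, pvTok4, pvS1, pvS2, pvS3, pvS4, pvPre, pvSuf, pvWrap], by simp [pvTok1, pvTok2, pvTok3, pvTok4, pvS1, pvS2, pvS3, pvS4, pvPre, pvSuf, pvWrap], by simp [pvTok1, pvTok2, pvTok3, pvTok4, pvS1, pvS2, pvS3, pvS4, pvPre, pvSuf, pvWrap]⟩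
lemma pass34 (new x : List Char) : pvRep '<' pvS3 new (pvTok4 ++ x) = pvTok4 ++ pvRep '<' pvS3 new x :=
  pvRep_pass '<' pvS3 new pvTok4 x (by simp [pvTok1, pvTok2, pvTok3, pvTok4, pvS1, pvS2, pvS3, pvS4, pvPre, pvSuf, pvWrap]) ⟨3, by simp [pvTok1, pvTok2, pvTok3, pvTok4, pvS1, pvS2, pvS3, pvS4, pvPre, pvSuf, pvWrap], by simp [pvTok1, pvTok2, pvTok3, pvTok4, pvS1, pvS2, pvS3, pvS4, pvPre, pvSuf, pvWrap], by simp [pvTok1, pvTok2, pvTok3, pvTok4, pvS1, pvS2, pvS3, pvS4, pvPre, pvSuf, pvWrap]⟩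
lemma pass41 (new x : List Char) : pvRep '<' pvS4 new (pvTok1 ++ x) = pvTok1 ++ pvRep '<' pvS4 new x :=
  pvRep_pass '<' pvS4 new pvTok1 x (by simp [pvTok1, pvTok2, pvTok3, pvTok4, pvS1, pvS2, pvS3, pvS4, pvPre, pvSuf, pvWrap]) ⟨2, by simp [pvTok1, pvTok2, pvTok3, pvTok4, pvS1, pvS2, pvS3, pvS4, pvPre, pvSuf, pvWrap], by simp [pvTok1, pvTok2, pvTok3, pvTok4, pvS1, pvS2, pvS3, pvS4, pvPre, pvSuf, pvWrap], by simp [pvTok1, pvTok2, pvTok3, pvTok4, pvS1, pvS2, pvS3, pvS4, pvPre, pvSuf, pvWrap]⟩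
lemma pass42 (new x : List Char) : pvRep '<' pvS4 new (pvTok2 ++ x) = pvTok2 ++ pvRep '<' pvS4 new x :=
  pvRep_pass '<' pvS4 new pvTok2 x (by simp [pvTok1, pvTok2, pvTok3, pvTok4, pvS1, pvS2, pvS3, pvS4, pvPre, pvSuf, pvWrap]) ⟨2, by simp [pvTok1, pvTok2, pvTok3, pvTok4, pvS1, pvS2, pvS3, pvS4, pvPre, pvSuf, pvWrap], by simp [pvTok1, pvTok2, pvTok3, pvTok4, pvS1, pvS2, pvS3, pvS4, pvPre, pvSuf, pvWrap], by simp [pvTok1, pvTok2, pvTok3, pvTok4, pvS1, pvS2, pvS3, pvS4, pvPre, pvSuf, pvWrap]⟩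
lemma pass43 (new x : List Char) : pvRep '<' pvS4 new (pvTok3 ++ x) = pvTok3 ++ pvRep '<' pvS4 new x :=
  pvRep_pass '<' pvS4 new pvTok3 x (by simp [pvTok1, pvTok2, pvTok3, pvTok4, pvS1, pvS2, pvS3, pvS4, pvPre, pvSuf, pvWrap]) ⟨3, by simp [pvTok1, pvTok2, pvTok3, pvTok4, pvS1, pvS2, pvS3, pvS4, pvPre, pvSuf, pvWrap], by simp [pvTok1, pvTok2, pvTok3, pvTok4, pvS1, pvS2, pvS3, pvS4, pvPre, pvSuf, pvWrap], by simp [pvTok1, pvTok2, pvTok3, pvTok4, pvS1, pvS2, pvS3, pvS4, pvPre, pvSuf, pvWrap]⟩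

-- every needle passes over the span prefix and suffix (their '<' is followed by 's' resp. '/')
lemma passPre2 (new x : List Char) : pvRep '<' pvS2 new (pvPre ++ x) = pvPre ++ pvRep '<' pvS2 new x :=
  pvRep_pass '<' pvS2 new pvPre x (by simp [pvTok1, pvTok2, pvTok3, pvTok4, pvS1, pvS2, pvS3, pvS4, pvPre, pvSuf, pvWrap]) ⟨1, by simp [pvTok1, pvTok2, pvTok3, pvTok4, pvS1, pvS2, pvS3, pvS4, pvPre, pvSuf, pvWrap], by simp [pvTok1, pvTok2, pvTok3, pvTok4, pvS1, pvS2, pvS3, pvS4, pvPre, pvSuf, pvWrap], by simp [pvTok1, pvTok2, pvTok3, pvTok4, pvS1, pvS2, pvS3, pvS4, pvPre, pvSuf, pvWrap]⟩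
lemma passPre3 (new x : List Char) : pvRep '<' pvS3 new (pvPre ++ x) = pvPre ++ pvRep '<' pvS3 new x :=
  pvRep_pass '<' pvS3 new pvPre x (by simp [pvTok1, pvTok2, pvTok3, pvTok4, pvS1, pvS2, pvS3, pvS4, pvPre, pvSuf, pvWrap]) ⟨1, by simp [pvTok1, pvTok2, pvTok3, pvTok4, pvS1, pvS2, pvS3, pvS4, pvPre, pvSuf, pvWrap], by simp [pvTok1, pvTok2, pvTok3, pvTok4, pvS1, pvS2, pvS3, pvS4, pvPre, pvSuf, pvWrap], by simp [pvTok1, pvTok2, pvTok3, pvTok4, pvS1, pvS2, pvS3, pvS4, pvPre, pvSuf, pvWrap]⟩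
lemma passPre4 (new x : List Char) : pvRep '<' pvS4 new (pvPre ++ x) = pvPre ++ pvRep '<' pvS4 new x :=
  pvRep_pass '<' pvS4 new pvPre x (by simp [pvTok1, pvTok2, pvTok3, pvTok4, pvS1, pvS2, pvS3, pvS4, pvPre, pvSuf, pvWrap]) ⟨1, by simp [pvTok1, pvTok2, pvTok3, pvTok4, pvS1, pvS2, pvS3, pvS4, pvPre, pvSuf, pvWrap], by simp [pvTok1, pvTok2, pvTok3, pvTok4, pvS1, pvS2, pvS3, pvS4, pvPre, pvSuf, pvWrap], by simp [pvTok1, pvTok2, pvTok3, pvTok4, pvS1, pvS2, pvS3, pvS4, pvPre, pvSuf, pvWrap]⟩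
lemma passSuf2 (new x : List Char) : pvRep '<' pvS2 new (pvSuf ++ x) = pvSuf ++ pvRep '<' pvS2 new x :=
  pvRep_pass '<' pvS2 new pvSuf x (by simp [pvTok1, pvTok2, pvTok3, pvTok4, pvS1, pvS2, pvS3, pvS4, pvPre, pvSuf, pvWrap]) ⟨1, by simp [pvTok1, pvTok2, pvTok3, pvTok4, pvS1, pvS2, pvS3, pvS4, pvPre, pvSuf, pvWrap], by simp [pvTok1, pvTok2, pvTok3, pvTok4, pvS1, pvS2, pvS3, pvS4, pvPre, pvSuf, pvWrap], by simp [pvTok1, pvTok2, pvTok3, pvTok4, pvS1, pvS2, pvS3, pvS4, pvPre, pvSuf, pvWrap]⟩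
lemma passSuf3 (new x : List Char) : pvRep '<' pvS3 new (pvSuf ++ x) = pvSuf ++ pvRep '<' pvS3 new x :=
  pvRep_pass '<' pvS3 new pvSuf x (by simp [pvTok1, pvTok2, pvTok3, pvTok4, pvS1, pvS2, pvS3, pvS4, pvPre, pvSuf, pvWrap]) ⟨1, by simp [pvTok1, pvTok2, pvTok3, pvTok4, pvS1, pvS2, pvS3, pvS4, pvPre, pvSuf, pvWrap], by simp [pvTok1, pvTok2, pvTok3, pvTok4, pvS1, pvS2, pvS3, pvS4, pvPre, pvSuf, pvWrap], by simp [pvTok1, pvTok2, pvTok3, pvTok4, pvS1, pvS2, pvS3, pvS4, pvPre, pvSuf, pvWrap]⟩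
lemma passSuf4 (new x : List Char) : pvRep '<' pvS4 new (pvSuf ++ x) = pvSuf ++ pvRep '<' pvS4 new x :=
  pvRep_pass '<' pvS4 new pvSuf x (by simp [pvTok1, pvTok2, pvTok3, pvTok4, pvS1, pvS2, pvS3, pvS4, pvPre, pvSuf, pvWrap]) ⟨1, by simp [pvTok1, pvTok2, pvTok3, pvTok4, pvS1, pvS2, pvS3, pvS4, pvPre, pvSuf, pvWrap], by simp [pvTok1, pvTok2, pvTok3, pvTok4, pvS1, pvS2, pvS3, pvS4, pvPre, pvSuf, pvWrap], by simp [pvTok1, pvTok2, pvTok3, pvTok4, pvS1, pvS2, pvS3, pvS4, pvPre, pvSuf, pvWrap]⟩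

-- a needle passes over a whole wrapped token (pre, token, suf, one after the other)
lemma pass_wrap (os new tk x : List Char)
    (hpre : ∀ y, pvRep '<' os new (pvPre ++ y) = pvPre ++ pvRep '<' os new y)
    (hsuf : ∀ y, pvRep '<' os new (pvSuf ++ y) = pvSuf ++ pvRep '<' os new y)
    (htk : ∀ y, pvRep '<' os new (tk ++ y) = tk ++ pvRep '<' os new y) :
    pvRep '<' os new (pvWrap tk ++ x) = pvWrap tk ++ pvRep '<' os new x := by
  rw [wrap_eq, List.append_assoc, List.append_assoc, hpre, htk, hsuf]
  simp [List.append_assoc]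

-- the per-token scan equations
lemma pvScan_tok1 (x : List Char) : pvScan (pvTok1 ++ x) = pvWrap pvTok1 ++ pvScan x := by
  have h : pvTok1 ++ x = '<' :: (pvS1 ++ x) := by rw [tok1_eq, List.cons_append]
  rw [h, pvScan_cons, if_pos (by rw [← h, List.isPrefixOf_iff_prefix]; exact List.prefix_append _ _)]
  rw [show List.drop pvTok1.length ('<' :: (pvS1 ++ x)) = x from by rw [← h]; exact List.drop_left]

lemma pvScan_tok2 (x : List Char) : pvScan (pvTok2 ++ x) = pvWrap pvTok2 ++ pvScan x := by
  have h : pvTok2 ++ x = '<' :: (pvS2 ++ x) := by rw [tok2_eq, List.cons_append]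
  rw [h, pvScan_cons,
    if_neg (by rw [← h]; exact notPrefix_of_mismatch pvTok1 pvTok2 x 2 (by simp [pvTok1, pvTok2, pvTok3, pvTok4, pvS1, pvS2, pvS3, pvS4, pvPre, pvSuf, pvWrap]) (by simp [pvTok1, pvTok2, pvTok3, pvTok4, pvS1, pvS2, pvS3, pvS4, pvPre, pvSuf, pvWrap]) (by simp [pvTok1, pvTok2, pvTok3, pvTok4, pvS1, pvS2, pvS3, pvS4, pvPre, pvSuf, pvWrap])),
    if_pos (by rw [← h, List.isPrefixOf_iff_prefix]; exact List.prefix_append _ _)]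
  rw [show List.drop pvTok2.length ('<' :: (pvS2 ++ x)) = x from by rw [← h]; exact List.drop_left]

lemma pvScan_tok3 (x : List Char) : pvScan (pvTok3 ++ x) = pvWrap pvTok3 ++ pvScan x := by
  have h : pvTok3 ++ x = '<' :: (pvS3 ++ x) := by rw [tok3_eq, List.cons_append]
  rw [h, pvScan_cons,
    if_neg (by rw [← h]; exact notPrefix_of_mismatch pvTok1 pvTok3 x 2 (by simp [pvTok1, pvTok2, pvTok3, pvTok4, pvS1, pvS2, pvS3, pvS4, pvPre, pvSuf, pvWrap]) (by simp [pvTok1, pvTok2, pvTok3, pvTok4, pvS1, pvS2, pvS3, pvS4, pvPre, pvSuf, pvWrap]) (by simp [pvTok1, pvTok2, pvTok3, pvTok4, pvS1, pvS2, pvS3, pvS4, pvPre, pvSuf, pvWrap])),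
    if_neg (by rw [← h]; exact notPrefix_of_mismatch pvTok2 pvTok3 x 2 (by simp [pvTok1, pvTok2, pvTok3, pvTok4, pvS1, pvS2, pvS3, pvS4, pvPre, pvSuf, pvWrap]) (by simp [pvTok1, pvTok2, pvTok3, pvTok4, pvS1, pvS2, pvS3, pvS4, pvPre, pvSuf, pvWrap]) (by simp [pvTok1, pvTok2, pvTok3, pvTok4, pvS1, pvS2, pvS3, pvS4, pvPre, pvSuf, pvWrap])),
    if_pos (by rw [← h, List.isPrefixOf_iff_prefix]; exact List.prefix_append _ _)]
  rw [show List.drop pvTok3.length ('<' :: (pvS3 ++ x)) = x from by rw [← h]; exact List.drop_left]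

lemma pvScan_tok4 (x : List Char) : pvScan (pvTok4 ++ x) = pvWrap pvTok4 ++ pvScan x := by
  have h : pvTok4 ++ x = '<' :: (pvS4 ++ x) := by rw [tok4_eq, List.cons_append]
  rw [h, pvScan_cons,
    if_neg (by rw [← h]; exact notPrefix_of_mismatch pvTok1 pvTok4 x 2 (by simp [pvTok1, pvTok2, pvTok3, pvTok4, pvS1, pvS2, pvS3, pvS4, pvPre, pvSuf, pvWrap]) (by simp [pvTok1, pvTok2, pvTok3, pvTok4, pvS1, pvS2, pvS3, pvS4, pvPre, pvSuf, pvWrap]) (by simp [pvTok1, pvTok2, pvTok3, pvTok4, pvS1, pvS2, pvS3, pvS4, pvPre, pvSuf, pvWrap])),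
    if_neg (by rw [← h]; exact notPrefix_of_mismatch pvTok2 pvTok4 x 2 (by simp [pvTok1, pvTok2, pvTok3, pvTok4, pvS1, pvS2, pvS3, pvS4, pvPre, pvSuf, pvWrap]) (by simp [pvTok1, pvTok2, pvTok3, pvTok4, pvS1, pvS2, pvS3, pvS4, pvPre, pvSuf, pvWrap]) (by simp [pvTok1, pvTok2, pvTok3, pvTok4, pvS1, pvS2, pvS3, pvS4, pvPre, pvSuf, pvWrap])),
    if_neg (by rw [← h]; exact notPrefix_of_mismatch pvTok3 pvTok4 x 3 (by simp [pvTok1, pvTok2, pvTok3, pvTok4, pvS1, pvS2, pvS3, pvS4, pvPre, pvSuf, pvWrap]) (by simp [pvTok1, pvTok2, pvTok3, pvTok4, pvS1, pvS2, pvS3, pvS4, pvPre, pvSuf, pvWrap]) (by simp [pvTok1, pvTok2, pvTok3, pvTok4, pvS1, pvS2, pvS3, pvS4, pvPre, pvSuf, pvWrap])),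
    if_pos (by rw [← h, List.isPrefixOf_iff_prefix]; exact List.prefix_append _ _)]
  rw [show List.drop pvTok4.length ('<' :: (pvS4 ++ x)) = x from by rw [← h]; exact List.drop_left]

lemma pvScan_nomatch (c : Char) (t : List Char)
    (h1 : ¬ pvTok1.isPrefixOf (c :: t) = true) (h2 : ¬ pvTok2.isPrefixOf (c :: t) = true)
    (h3 : ¬ pvTok3.isPrefixOf (c :: t) = true) (h4 : ¬ pvTok4.isPrefixOf (c :: t) = true) :
    pvScan (c :: t) = c :: pvScan t := by
  rw [pvScan_cons, if_neg h1, if_neg h2, if_neg h3, if_neg h4]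

-- a non-match at the head survives one replacement stage (the stage's output either
-- copies the head character or starts with the '<' of the span markup, and a token
-- tail is '<'-free)
lemma lift1 (os' new' tl : List Char) (c : Char) (t : List Char)
    (hnew' : new'[0]? = some '<') (htl : ∀ a ∈ tl, a ≠ '<')
    (h : ¬ ('<' :: tl).isPrefixOf (c :: t) = true) :
    ¬ ('<' :: tl).isPrefixOf (c :: pvRep '<' os' new' t) = true := by
  intro hp
  rw [List.isPrefixOf_iff_prefix, List.cons_prefix_cons] at hp
  exact h (by
    rw [List.isPrefixOf_iff_prefix, List.cons_prefix_cons]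
    exact ⟨hp.1, pvQ '<' os' new' hnew' t tl htl hp.2⟩)

-- the heart of the equivalence: A's four passes compose to B's single scan
lemma pvMain : ∀ n : Nat, ∀ l : List Char, l.length ≤ n → pvComp l = pvScan l := by
  intro n
  induction n using Nat.strong_induction_on with
  | _ n ih =>
    intro l hl
    match l with
    | [] =>
        simp [pvComp, pvStep1, pvStep2, pvStep3, pvStep4, pvRep_nil, pvScan_nil]
    | c :: t =>
      by_cases p1 : pvTok1.isPrefixOf (c :: t) = true
      · obtain ⟨r, hr⟩ := List.isPrefixOf_iff_prefix.mp p1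
        rw [← hr, pvScan_tok1]
        have s1 : pvStep1 (pvTok1 ++ r) = pvWrap pvTok1 ++ pvStep1 r := by
          rw [pvStep1, tok1_eq, pvRep_match, ← tok1_eq]; rfl
        have hlen : r.length < n := by
          rw [← hr] at hl; simp [pvTok1] at hl; omega
        rw [pvComp, s1, show pvStep2 (pvWrap pvTok1 ++ pvStep1 r) = pvWrap pvTok1 ++ pvStep2 (pvStep1 r) from
              pass_wrap pvS2 (pvWrap pvTok2) pvTok1 _ (passPre2 _) (passSuf2 _) (pass21 _),
            show pvStep3 (pvWrap pvTok1 ++ pvStep2 (pvStep1 r)) = pvWrap pvTok1 ++ pvStep3 (pvStep2 (pvStep1 r)) from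
              pass_wrap pvS3 (pvWrap pvTok3) pvTok1 _ (passPre3 _) (passSuf3 _) (pass31 _),
            show pvStep4 (pvWrap pvTok1 ++ pvStep3 (pvStep2 (pvStep1 r))) = pvWrap pvTok1 ++ pvStep4 (pvStep3 (pvStep2 (pvStep1 r))) from
              pass_wrap pvS4 (pvWrap pvTok4) pvTok1 _ (passPre4 _) (passSuf4 _) (pass41 _)]
        rw [show pvStep4 (pvStep3 (pvStep2 (pvStep1 r))) = pvComp r from rfl, ih r.length hlen r le_rfl]
      · by_cases p2 : pvTok2.isPrefixOf (c :: t) = true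
        · obtain ⟨r, hr⟩ := List.isPrefixOf_iff_prefix.mp p2
          rw [← hr, pvScan_tok2]
          have s1 : pvStep1 (pvTok2 ++ r) = pvTok2 ++ pvStep1 r := pass12 _ _
          have s2 : pvStep2 (pvTok2 ++ pvStep1 r) = pvWrap pvTok2 ++ pvStep2 (pvStep1 r) := by
            rw [pvStep2, tok2_eq, pvRep_match, ← tok2_eq]; rfl
          have hlen : r.length < n := by
            rw [← hr] at hl; simp [pvTok2] at hl; omega
          rw [pvComp, s1, s2,
              show pvStep3 (pvWrap pvTok2 ++ pvStep2 (pvStep1 r)) = pvWrap pvTok2 ++ pvStep3 (pvStep2 (pvStep1 r)) from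
                pass_wrap pvS3 (pvWrap pvTok3) pvTok2 _ (passPre3 _) (passSuf3 _) (pass32 _),
              show pvStep4 (pvWrap pvTok2 ++ pvStep3 (pvStep2 (pvStep1 r))) = pvWrap pvTok2 ++ pvStep4 (pvStep3 (pvStep2 (pvStep1 r))) from
                pass_wrap pvS4 (pvWrap pvTok4) pvTok2 _ (passPre4 _) (passSuf4 _) (pass42 _)]
          rw [show pvStep4 (pvStep3 (pvStep2 (pvStep1 r))) = pvComp r from rfl, ih r.length hlen r le_rfl]
        · by_cases p3 : pvTok3.isPrefixOf (c :: t) = true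
          · obtain ⟨r, hr⟩ := List.isPrefixOf_iff_prefix.mp p3
            rw [← hr, pvScan_tok3]
            have s1 : pvStep1 (pvTok3 ++ r) = pvTok3 ++ pvStep1 r := pass13 _ _
            have s2 : pvStep2 (pvTok3 ++ pvStep1 r) = pvTok3 ++ pvStep2 (pvStep1 r) := pass23 _ _
            have s3 : pvStep3 (pvTok3 ++ pvStep2 (pvStep1 r)) = pvWrap pvTok3 ++ pvStep3 (pvStep2 (pvStep1 r)) := by
              rw [pvStep3, tok3_eq, pvRep_match, ← tok3_eq]; rfl
            have hlen : r.length < n := by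
              rw [← hr] at hl; simp [pvTok3] at hl; omega
            rw [pvComp, s1, s2, s3,
                show pvStep4 (pvWrap pvTok3 ++ pvStep3 (pvStep2 (pvStep1 r))) = pvWrap pvTok3 ++ pvStep4 (pvStep3 (pvStep2 (pvStep1 r))) from
                  pass_wrap pvS4 (pvWrap pvTok4) pvTok3 _ (passPre4 _) (passSuf4 _) (pass43 _)]
            rw [show pvStep4 (pvStep3 (pvStep2 (pvStep1 r))) = pvComp r from rfl, ih r.length hlen r le_rfl]
          · by_cases p4 : pvTok4.isPrefixOf (c :: t) = true
            · obtain ⟨r, hr⟩ := List.isPrefixOf_iff_prefix.mp p4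
              rw [← hr, pvScan_tok4]
              have s1 : pvStep1 (pvTok4 ++ r) = pvTok4 ++ pvStep1 r := pass14 _ _
              have s2 : pvStep2 (pvTok4 ++ pvStep1 r) = pvTok4 ++ pvStep2 (pvStep1 r) := pass24 _ _
              have s3 : pvStep3 (pvTok4 ++ pvStep2 (pvStep1 r)) = pvTok4 ++ pvStep3 (pvStep2 (pvStep1 r)) := pass34 _ _
              have s4 : pvStep4 (pvTok4 ++ pvStep3 (pvStep2 (pvStep1 r))) = pvWrap pvTok4 ++ pvStep4 (pvStep3 (pvStep2 (pvStep1 r))) := by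
                rw [pvStep4, tok4_eq, pvRep_match, ← tok4_eq]; rfl
              have hlen : r.length < n := by
                rw [← hr] at hl; simp [pvTok4] at hl; omega
              rw [pvComp, s1, s2, s3, s4]
              rw [show pvStep4 (pvStep3 (pvStep2 (pvStep1 r))) = pvComp r from rfl, ih r.length hlen r le_rfl]
            · -- no token matches at this position: every stage copies the head character
              rw [pvScan_nomatch c t p1 p2 p3 p4]
              have q1 : pvStep1 (c :: t) = c :: pvStep1 t := by
                rw [pvStep1, pvRep_cons, if_neg (by rw [← tok1_eq]; exact p1)]; rfl
              have n2 : ¬ pvTok2.isPrefixOf (c :: pvStep1 t) = true := by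
                rw [tok2_eq]
                exact lift1 pvS1 (pvWrap pvTok1) pvS2 c t (by simp [pvTok1, pvTok2, pvTok3, pvTok4, pvS1, pvS2, pvS3, pvS4, pvPre, pvSuf, pvWrap]) (by simp [pvTok1, pvTok2, pvTok3, pvTok4, pvS1, pvS2, pvS3, pvS4, pvPre, pvSuf, pvWrap]) (by rw [← tok2_eq]; exact p2)
              have q2 : pvStep2 (c :: pvStep1 t) = c :: pvStep2 (pvStep1 t) := by
                rw [pvStep2, pvRep_cons, if_neg (by rw [← tok2_eq]; exact n2)]; rfl
              have n3 : ¬ pvTok3.isPrefixOf (c :: pvStep2 (pvStep1 t)) = true := by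
                rw [tok3_eq]
                apply lift1 pvS2 (pvWrap pvTok2) pvS3 c (pvStep1 t) (by simp [pvTok1, pvTok2, pvTok3, pvTok4, pvS1, pvS2, pvS3, pvS4, pvPre, pvSuf, pvWrap]) (by simp [pvTok1, pvTok2, pvTok3, pvTok4, pvS1, pvS2, pvS3, pvS4, pvPre, pvSuf, pvWrap])
                exact lift1 pvS1 (pvWrap pvTok1) pvS3 c t (by simp [pvTok1, pvTok2, pvTok3, pvTok4, pvS1, pvS2, pvS3, pvS4, pvPre, pvSuf, pvWrap]) (by simp [pvTok1, pvTok2, pvTok3, pvTok4, pvS1, pvS2, pvS3, pvS4, pvPre, pvSuf, pvWrap]) (by rw [← tok3_eq]; exact p3)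
              have q3 : pvStep3 (c :: pvStep2 (pvStep1 t)) = c :: pvStep3 (pvStep2 (pvStep1 t)) := by
                rw [pvStep3, pvRep_cons, if_neg (by rw [← tok3_eq]; exact n3)]; rfl
              have n4 : ¬ pvTok4.isPrefixOf (c :: pvStep3 (pvStep2 (pvStep1 t))) = true := by
                rw [tok4_eq]
                apply lift1 pvS3 (pvWrap pvTok3) pvS4 c (pvStep2 (pvStep1 t)) (by simp [pvTok1, pvTok2, pvTok3, pvTok4, pvS1, pvS2, pvS3, pvS4, pvPre, pvSuf, pvWrap]) (by simp [pvTok1, pvTok2, pvTok3, pvTok4, pvS1, pvS2, pvS3, pvS4, pvPre, pvSuf, pvWrap])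
                apply lift1 pvS2 (pvWrap pvTok2) pvS4 c (pvStep1 t) (by simp [pvTok1, pvTok2, pvTok3, pvTok4, pvS1, pvS2, pvS3, pvS4, pvPre, pvSuf, pvWrap]) (by simp [pvTok1, pvTok2, pvTok3, pvTok4, pvS1, pvS2, pvS3, pvS4, pvPre, pvSuf, pvWrap])
                exact lift1 pvS1 (pvWrap pvTok1) pvS4 c t (by simp [pvTok1, pvTok2, pvTok3, pvTok4, pvS1, pvS2, pvS3, pvS4, pvPre, pvSuf, pvWrap]) (by simp [pvTok1, pvTok2, pvTok3, pvTok4, pvS1, pvS2, pvS3, pvS4, pvPre, pvSuf, pvWrap]) (by rw [← tok4_eq]; exact p4)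
              have q4 : pvStep4 (c :: pvStep3 (pvStep2 (pvStep1 t))) = c :: pvStep4 (pvStep3 (pvStep2 (pvStep1 t))) := by
                rw [pvStep4, pvRep_cons, if_neg (by rw [← tok4_eq]; exact n4)]; rfl
              have hlen : t.length < n := by simp at hl; omega
              rw [pvComp, q1, q2, q3, q4]
              rw [show pvStep4 (pvStep3 (pvStep2 (pvStep1 t))) = pvComp t from rfl, ih t.length hlen t le_rfl]

-- A's foldl, written out, is pvComp on the character list
lemma pvA_eq (prompt : String) :
    highlight_prompt prompt = String.ofList (pvComp prompt.toList) := by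
  rw [highlight_prompt]
  simp only [List.foldl]
  rw [PySem.Str.replace, PySem.Str.replace, PySem.Str.replace, PySem.Str.replace]
  rw [String.toList_ofList, String.toList_ofList, String.toList_ofList]
  rw [show ("<|begin_of_text|>" : String).toList = '<' :: pvS1 from by simp [pvTok1, pvTok2, pvTok3, pvTok4, pvS1, pvS2, pvS3, pvS4, pvPre, pvSuf, pvWrap],
      show ("<|start_header_id|>" : String).toList = '<' :: pvS2 from by simp [pvTok1, pvTok2, pvTok3, pvTok4, pvS1, pvS2, pvS3, pvS4, pvPre, pvSuf, pvWrap],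
      show ("<|end_header_id|>" : String).toList = '<' :: pvS3 from by simp [pvTok1, pvTok2, pvTok3, pvTok4, pvS1, pvS2, pvS3, pvS4, pvPre, pvSuf, pvWrap],
      show ("<|eot_id|>" : String).toList = '<' :: pvS4 from by simp [pvTok1, pvTok2, pvTok3, pvTok4, pvS1, pvS2, pvS3, pvS4, pvPre, pvSuf, pvWrap]]
  rw [replace_eq_pvRep, replace_eq_pvRep, replace_eq_pvRep, replace_eq_pvRep]
  rw [show ("<span style='color:blue; font-weight:bold;'>" ++ "<|begin_of_text|>" ++ "</span>" : String).toList = pvWrap pvTok1 from by simp [pvTok1, pvTok2, pvTok3, pvTok4, pvS1, pvS2, pvS3, pvS4, pvPre, pvSuf, pvWrap],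
      show ("<span style='color:blue; font-weight:bold;'>" ++ "<|start_header_id|>" ++ "</span>" : String).toList = pvWrap pvTok2 from by simp [pvTok1, pvTok2, pvTok3, pvTok4, pvS1, pvS2, pvS3, pvS4, pvPre, pvSuf, pvWrap],
      show ("<span style='color:blue; font-weight:bold;'>" ++ "<|end_header_id|>" ++ "</span>" : String).toList = pvWrap pvTok3 from by simp [pvTok1, pvTok2, pvTok3, pvTok4, pvS1, pvS2, pvS3, pvS4, pvPre, pvSuf, pvWrap],
      show ("<span style='color:blue; font-weight:bold;'>" ++ "<|eot_id|>" ++ "</span>" : String).toList = pvWrap pvTok4 from by simp [pvTok1, pvTok2, pvTok3, pvTok4, pvS1, pvS2, pvS3, pvS4, pvPre, pvSuf, pvWrap]]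
  rfl

-- ===== VERDICT (by name: the statement is the Claim_ definition above) =====
theorem highlight_prompt_spec : Claim_equal_highlight_prompt := by
  intro prompt _
  unfold Spec_highlight_prompt highlight_prompt_alt
  rw [pvA_eq, pvMain prompt.toList.length prompt.toList le_rfl]
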